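-- pv_equiv track=rewrite | github.com/enveryildirim/Kriptoloji-Algoritmalari | permutasyon.py | sifrele
-- ===== SOURCE A (Python) =====
-- key=[2,0,1]
--
-- def sifrele(metin):
--     #sonuna x ekliyoruz metin uygun hale gelsin diye
--     tmp=3-len(metin)%3
--     if tmp!=0:
--         for c in range(tmp):
--             metin+="x"
--     smetin=""
--     metin=metin.lower()
--     #metnimizi anahtara göre şifreliyoruz
--     for c in range(0,len(metin),3):
--         smetin += metin[c+key[0]]
--         smetin += metin[c+key[1]]
--         smetin += metin[c+key[2]]
--     return smetin
-- ===== SOURCE B (Python) =====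
-- def sifrele(metin):
--     s = (metin + "x" * (3 - len(metin) % 3)).lower()
--     return "".join(a + b + c for a, b, c in zip(s[2::3], s[0::3], s[1::3]))
-- ===== Notes on version B (the rewrite author's own statement) =====
-- stated objective: alternative
-- what changed: B replaces A's index-arithmetic loop over 3-blocks (three indexed lookups and string += per block) with a column decomposition: pad-and-lower once, take the three strided slices s[2::3], s[0::3], s[1::3] and interleave them with zip and one join.
import Mathlib
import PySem

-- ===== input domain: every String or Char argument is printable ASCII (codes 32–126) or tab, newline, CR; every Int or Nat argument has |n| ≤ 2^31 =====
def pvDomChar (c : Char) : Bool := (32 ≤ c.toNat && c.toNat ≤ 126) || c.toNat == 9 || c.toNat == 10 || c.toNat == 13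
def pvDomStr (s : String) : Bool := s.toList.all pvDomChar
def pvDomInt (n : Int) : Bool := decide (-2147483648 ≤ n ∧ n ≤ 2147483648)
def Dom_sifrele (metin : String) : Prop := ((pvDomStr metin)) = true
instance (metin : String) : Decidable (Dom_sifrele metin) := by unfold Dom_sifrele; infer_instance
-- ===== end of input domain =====

-- B re-reads A's block permutation as three strided column slices interleaved with zip
-- (alternative decomposition, same cost); the padding quirk (a full "xxx" block when the
-- length is already a multiple of 3) is reproduced exactly.

-- ===== PORT A =====
-- A step for step on List Char. The indices c+2, c+0, c+1 are always in range (the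
-- padding makes the length a positive multiple of 3), so pyGet? never returns none;
-- Option.toList appends the one looked-up character.
def sifreleChars (metin : List Char) : List Char :=
  let tmp : Int := 3 - PySem.Int.mod (metin.length : Int) 3
  let metin :=
    if tmp ≠ 0 then (PySem.List.pyRange 0 tmp 1).foldl (fun m _ => m ++ ['x']) metin
    else metin
  let metin := PySem.Chars.lower metin
  (PySem.List.pyRange 0 (metin.length : Int) 3).foldl
    (fun s c => s ++ ((PySem.List.pyGet? metin (c + 2)).toList
        ++ (PySem.List.pyGet? metin (c + 0)).toList
        ++ (PySem.List.pyGet? metin (c + 1)).toList)) []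

def sifrele (metin : String) : String := String.ofList (sifreleChars metin.toList)

-- ===== PORT B =====
-- Source B: pad-and-lower once, take the three strided slices s[2::3], s[0::3], s[1::3],
-- zip them and flatten. slice? is some whenever the step is nonzero, so getD [] is exact.
def sifrele_altChars (metin : List Char) : List Char :=
  let s := PySem.Chars.lower (metin ++ List.replicate (3 - metin.length % 3) 'x')
  let s2 := (PySem.List.slice? s (some 2) none 3).getD []
  let s0 := (PySem.List.slice? s (some 0) none 3).getD []
  let s1 := (PySem.List.slice? s (some 1) none 3).getD []
  (s2.zip (s0.zip s1)).flatMap (fun t => [t.1, t.2.1, t.2.2])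

def sifrele_alt (metin : String) : String := String.ofList (sifrele_altChars metin.toList)

-- ===== PRECONDITION & SPEC =====
def Spec_sifrele (metin : String) (out : String) : Prop := out = sifrele_alt metin
instance (metin : String) (out : String) : Decidable (Spec_sifrele metin out) := by unfold Spec_sifrele; infer_instance

-- ===== CLAIM (what is proved, stated in full; the proofs are below) =====
def Claim_equal_sifrele : Prop := ∀ (metin : String), Dom_sifrele metin → Spec_sifrele metin (sifrele metin)

-- ===== LEMMAS AND PROOFS =====

theorem flatMap_const_singleton {α β : Type} (l : List α) (a : β) :
    l.flatMap (fun _ => [a]) = List.replicate l.length a := by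
  induction l with
  | nil => rfl
  | cons x xs ih => simp [List.flatMap_cons, ih, List.replicate_succ]

theorem filterMap_some_eq_map {α β : Type} (f : α → Option β) (g : α → β) (l : List α)
    (h : ∀ a ∈ l, f a = some (g a)) : l.filterMap f = l.map g := by
  induction l with
  | nil => rfl
  | cons x xs ih =>
    simp [h x (by simp), ih (fun a ha => h a (by simp [ha]))]

-- A's padding loop is exactly appending 3 - len % 3 copies of 'x'
theorem pad_eq (metin : List Char) :
    (PySem.List.pyRange 0 (3 - PySem.Int.mod (metin.length : Int) 3) 1).foldl
        (fun m _ => m ++ ['x']) metin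
      = metin ++ List.replicate (3 - metin.length % 3) 'x' := by
  have hmod : PySem.Int.mod (metin.length : Int) 3 = ((metin.length % 3 : Nat) : Int) := by
    exact_mod_cast PySem.Int.mod_natCast metin.length 3
  have h3 : metin.length % 3 < 3 := Nat.mod_lt _ (by omega)
  rw [hmod, PySem.List.foldl_append_eq_flatMap (fun _ => ['x']),
    flatMap_const_singleton, PySem.List.pyRange_of_pos _ _ (by omega : (0:Int) < 1)]
  simp only [List.length_map, List.length_range]
  congr 2
  split
  · omega
  · omega

-- B's slice s[k0::3] of a list of length 3*m is the k0-th column, element by element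
theorem slice_stride (p : List Char) (m k0 : Nat) (hp : p.length = 3 * m) (hk : k0 < 3) (hm : 0 < m) :
    (PySem.List.slice? p (some (k0 : Int)) none 3).getD []
      = (List.range m).map (fun j => p.getD (k0 + 3 * j) 'x') := by
  simp only [PySem.List.slice?, PySem.List.sliceIndices]
  norm_num
  have hstart : (if (k0:Int) < 0 then max ((k0:Int) + (p.length:Int)) 0 else min (k0:Int) (p.length:Int)) = (k0:Int) := by
    rw [if_neg (by omega)]
    omega
  rw [hstart]
  have hcount : (if (k0:Int) < (p.length:Int) then ((((p.length:Int) - (k0:Int)) + 3 - 1) / 3).toNat else 0) = m := by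
    rw [if_pos (by omega)]
    omega
  rw [hcount]
  apply filterMap_some_eq_map
  intro j hj
  simp only [List.mem_range] at hj
  have hidx : ((k0:Int) + 3 * (j:Int)).toNat = k0 + 3 * j := by omega
  rw [hidx]
  rw [List.getElem?_eq_getElem (by omega)]
  simp

-- the core: on a list whose length is 3*m, A's block loop equals B's zip of strides
theorem core (p : List Char) (m : Nat) (hp : p.length = 3 * m) (hm : 0 < m) :
    (PySem.List.pyRange 0 (p.length : Int) 3).foldl
        (fun s c => s ++ ((PySem.List.pyGet? p (c + 2)).toList
            ++ (PySem.List.pyGet? p (c + 0)).toList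
            ++ (PySem.List.pyGet? p (c + 1)).toList)) []
      = ((((PySem.List.slice? p (some 2) none 3).getD []).zip
            ((((PySem.List.slice? p (some 0) none 3).getD [])).zip
              ((PySem.List.slice? p (some 1) none 3).getD []))).flatMap
          (fun t => [t.1, t.2.1, t.2.2])) := by
  have h2 := slice_stride p m 2 hp (by omega) hm
  have h0 := slice_stride p m 0 hp (by omega) hm
  have h1 := slice_stride p m 1 hp (by omega) hm
  norm_num at h2 h0 h1
  rw [h2, h0, h1, List.zip_map', List.zip_map', List.flatMap_map,
    PySem.List.foldl_append_eq_flatMap, PySem.List.pyRange_of_pos _ _ (by omega : (0:Int) < 3),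
    List.flatMap_map, List.nil_append]
  have hcount : (if (0:Int) < (p.length:Int) then ((((p.length:Int) - 0) + 3 - 1) / 3).toNat else 0) = m := by
    rw [if_pos (by omega)]
    omega
  rw [hcount]
  unfold List.flatMap
  apply congrArg
  apply List.map_congr_left
  intro j hj
  simp only [List.mem_range] at hj
  have e2 : (0 + 3 * (j:Int) + 2) = ((2 + 3*j : Nat) : Int) := by push_cast; ring
  have e0 : (0 + 3 * (j:Int) + 0) = ((0 + 3*j : Nat) : Int) := by push_cast; ring
  have e1 : (0 + 3 * (j:Int) + 1) = ((1 + 3*j : Nat) : Int) := by push_cast; ring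
  rw [e2, e0, e1, PySem.List.pyGet?_natCast, PySem.List.pyGet?_natCast, PySem.List.pyGet?_natCast,
    List.getElem?_eq_getElem (by omega), List.getElem?_eq_getElem (by omega),
    List.getElem?_eq_getElem (by omega)]
  simp [List.getElem?_eq_getElem (show 3 * j < p.length by omega)]

theorem chars_eq (metin : List Char) : sifreleChars metin = sifrele_altChars metin := by
  unfold sifreleChars sifrele_altChars
  simp only []
  have h3 : metin.length % 3 < 3 := Nat.mod_lt _ (by omega)
  have hmod : PySem.Int.mod (metin.length : Int) 3 = ((metin.length % 3 : Nat) : Int) := by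
    exact_mod_cast PySem.Int.mod_natCast metin.length 3
  rw [if_pos (by rw [hmod]; omega), pad_eq]
  have hp : (PySem.Chars.lower (metin ++ List.replicate (3 - metin.length % 3) 'x')).length
      = 3 * (metin.length / 3 + 1) := by
    simp [PySem.Chars.lower]
    omega
  rw [core _ (metin.length / 3 + 1) hp (by omega)]

-- ===== VERDICT (by name: the statement is the Claim_ definition above) =====
theorem sifrele_spec : Claim_equal_sifrele := by
  intro metin _
  unfold Spec_sifrele sifrele sifrele_alt
  rw [chars_eq]
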